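-- pv_equiv track=rewrite | github.com/nareshdama/DCQ | gui-bridge/executor.py | _extract_final_exception
-- ===== SOURCE A (Python) =====
-- def _extract_final_exception(lines: list[str]) -> str | None:
--     """
--     Walk the traceback lines backwards to find the final exception line.
--
--     Args:
--         lines: Traceback split into individual lines.
--
--     Returns:
--         The exception message string, or None if not found.
--     """
--     for line in reversed(lines):
--         stripped = line.strip()
--         if not stripped:
--             continue
--         # Exception lines typically look like: "ValueError: some message"
--         # or "cadquery.occ_impl.shapes.SomeError: message"
--         if "Error" in stripped or "Exception" in stripped or ":" in stripped:
--             # Skip traceback context lines (File "...", line N)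
--             if stripped.startswith("File ") or stripped.startswith("During handling"):
--                 continue
--             # Skip lines that are just code context
--             if stripped.startswith("^") or stripped.startswith("~"):
--                 continue
--             return stripped
--     return None
-- ===== SOURCE B (Python) =====
-- def _extract_final_exception(lines: list[str]) -> str | None:
--     """Collect all qualifying stripped lines in one comprehension, return the last."""
--     candidates = [
--         s for s in (line.strip() for line in lines)
--         if s
--         and ("Error" in s or "Exception" in s or ":" in s)
--         and not s.startswith(("File ", "During handling", "^", "~"))
--     ]
--     return candidates[-1] if candidates else None
-- ===== Notes on version B (the rewrite author's own statement) =====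
-- stated objective: simpler
-- what changed: Replaces A's reversed-iteration early-return loop (with three continue branches) by a single list comprehension collecting all qualifying stripped lines and returning the last element.
import Mathlib
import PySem

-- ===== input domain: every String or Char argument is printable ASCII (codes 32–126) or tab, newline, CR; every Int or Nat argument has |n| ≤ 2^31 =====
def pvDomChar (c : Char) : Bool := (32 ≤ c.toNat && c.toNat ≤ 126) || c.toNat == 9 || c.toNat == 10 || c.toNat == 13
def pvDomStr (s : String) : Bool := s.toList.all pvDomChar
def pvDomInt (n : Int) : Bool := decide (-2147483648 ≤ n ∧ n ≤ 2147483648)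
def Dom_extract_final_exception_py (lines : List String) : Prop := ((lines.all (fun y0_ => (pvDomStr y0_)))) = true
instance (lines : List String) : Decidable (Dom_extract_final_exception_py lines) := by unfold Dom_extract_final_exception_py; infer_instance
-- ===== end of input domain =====

-- B replaces A's backwards early-return scan by a single comprehension collecting all
-- qualifying stripped lines and taking the last — a simpler, flatter decomposition.


-- ===== PORT A =====
-- A walks `reversed(lines)` and returns the first stripped line that qualifies.
def pvGoA : List String → Option String
  | [] => none
  | line :: rest =>
    let s := PySem.Str.strip line
    if PySem.Str.len s == 0 then pvGoA rest
    else if PySem.Str.isIn "Error" s || PySem.Str.isIn "Exception" s || PySem.Str.isIn ":" s then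
      if PySem.Str.startswith s "File " || PySem.Str.startswith s "During handling" then pvGoA rest
      else if PySem.Str.startswith s "^" || PySem.Str.startswith s "~" then pvGoA rest
      else some s
    else pvGoA rest

def extract_final_exception_py (lines : List String) : Option String :=
  pvGoA lines.reverse

-- ===== PORT B =====
-- the comprehension's filter condition
def pvQual (s : String) : Bool :=
  !(PySem.Str.len s == 0) &&
  (PySem.Str.isIn "Error" s || PySem.Str.isIn "Exception" s || PySem.Str.isIn ":" s) &&
  !(PySem.Str.startswith s "File " || PySem.Str.startswith s "During handling" ||
    PySem.Str.startswith s "^" || PySem.Str.startswith s "~")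

def extract_final_exception_py_alt (lines : List String) : Option String :=
  let candidates := (lines.map PySem.Str.strip).filter pvQual
  if candidates = [] then none else candidates.getLast?

-- ===== PRECONDITION & SPEC =====
def Spec_extract_final_exception_py (lines : List String) (out : Option String) : Prop := out = extract_final_exception_py_alt lines
instance (lines : List String) (out : Option String) : Decidable (Spec_extract_final_exception_py lines out) := by unfold Spec_extract_final_exception_py; infer_instance

-- ===== CLAIM (what is proved, stated in full; the proofs are below) =====
def Claim_equal_extract_final_exception_py : Prop := ∀ (lines : List String), Dom_extract_final_exception_py lines → Spec_extract_final_exception_py lines (extract_final_exception_py lines)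

-- ===== LEMMAS AND PROOFS =====
-- A's backward first-match scan is head? of the filtered, stripped list.
theorem pvGoA_eq_head?_filter (ys : List String) :
    pvGoA ys = ((ys.map PySem.Str.strip).filter pvQual).head? := by
  induction ys with
  | nil => rfl
  | cons y ys ih =>
    simp only [pvGoA, List.map_cons, List.filter_cons]
    split_ifs with h1 h2 h3 h4 <;> simp_all [pvQual]

-- ===== VERDICT (by name: the statement is the Claim_ definition above) =====
theorem extract_final_exception_py_spec : Claim_equal_extract_final_exception_py := by
  intro lines _
  show extract_final_exception_py lines = extract_final_exception_py_alt lines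
  unfold extract_final_exception_py extract_final_exception_py_alt
  rw [pvGoA_eq_head?_filter]
  rw [List.map_reverse, List.filter_reverse, List.head?_reverse]
  simp only []
  split_ifs with h
  · simp [h]
  · rfl
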